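-- pv_equiv track=rewrite | github.com/busportals/portals-mcp | tools/classify_modular_edges.py | derive_piece_type
-- ===== SOURCE A (Python) =====
-- def derive_piece_type(edges):
--     """Derive the modular piece type from classified edges.
--
--     Counts open faces and their arrangement to determine type.
--
--     Args:
--         edges: Dict with keys "+x", "-x", "+z", "-z", each mapping to
--                a string "open" or "closed".
--
--     Returns:
--         String piece type: "straight", "corner", "t_junction",
--         "intersection", "end_cap", or "enclosed".
--     """
--     open_faces = [face for face in ["+z", "+x", "-z", "-x"]
--                   if edges.get(face) == "open"]
--     n_open = len(open_faces)
--
--     if n_open == 0: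
--         return "enclosed"
--     elif n_open == 1:
--         return "end_cap"
--     elif n_open == 4:
--         return "intersection"
--     elif n_open == 3:
--         return "t_junction"
--     elif n_open == 2:
--         # Check if the two open faces are opposite or adjacent
--         opposites = [{"+z", "-z"}, {"+x", "-x"}]
--         open_set = set(open_faces)
--         if open_set in opposites:
--             return "straight"
--         else:
--             return "corner"
--
--     # Fallback (shouldn't happen with 4 faces)
--     return "enclosed"
-- ===== SOURCE B (Python) =====
-- # B: classify via a 4-bit open-pattern index into a precomputed 16-entry table.
-- _FACES = ["+x", "-x", "+z", "-z"]  # bit 0,1,2,3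
--
-- def _classify(mask):
--     n = bin(mask).count("1")
--     if n == 2:
--         # opposite pairs: +x/-x = bits 0,1 (mask 3), +z/-z = bits 2,3 (mask 12)
--         return "straight" if mask in (3, 12) else "corner"
--     return ["enclosed", "end_cap", None, "t_junction", "intersection"][n]
--
-- PIECE_BY_PATTERN = [_classify(m) for m in range(16)]
--
-- def derive_piece_type(edges):
--     key = 0
--     bit = 1
--     for face in _FACES:
--         if edges.get(face) == "open":
--             key |= bit
--         bit <<= 1
--     return PIECE_BY_PATTERN[key]
-- ===== Notes on version B (the rewrite author's own statement) =====
-- stated objective: alternative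
-- what changed: Replaces the count-open-faces-then-branch dispatch (with a set comparison for the two-open case) by a 4-bit open-pattern index into a 16-entry table precomputed once at import.
import Mathlib
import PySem

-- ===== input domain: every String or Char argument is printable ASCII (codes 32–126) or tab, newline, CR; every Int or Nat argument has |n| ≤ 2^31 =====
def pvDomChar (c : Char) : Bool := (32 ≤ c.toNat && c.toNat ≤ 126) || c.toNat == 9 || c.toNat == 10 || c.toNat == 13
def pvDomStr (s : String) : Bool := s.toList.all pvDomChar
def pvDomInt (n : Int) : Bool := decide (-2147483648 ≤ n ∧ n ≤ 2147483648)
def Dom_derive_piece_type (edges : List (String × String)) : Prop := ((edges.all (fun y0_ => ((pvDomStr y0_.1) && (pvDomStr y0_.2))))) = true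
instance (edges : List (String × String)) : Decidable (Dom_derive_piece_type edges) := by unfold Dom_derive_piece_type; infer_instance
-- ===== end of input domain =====

-- B replaces A's count-then-branch dispatch by a 4-bit open-pattern index into a
-- precomputed 16-entry table (objective: alternative decomposition, same cost).

-- ===== PORT A =====
-- exact for Python set equality on lists of distinct elements (both operands here are)
def pySetEq (a b : List String) : Bool := a.all b.contains && b.all a.contains

def derive_piece_type (edges : List (String × String)) : String :=
  let open_faces := (["+z", "+x", "-z", "-x"]).filter
      (fun face => (PySem.Dict.mk edges).get? face == some "open")
  let n_open := open_faces.length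
  if n_open = 0 then "enclosed"
  else if n_open = 1 then "end_cap"
  else if n_open = 4 then "intersection"
  else if n_open = 3 then "t_junction"
  else if n_open = 2 then
    -- open_set in [{"+z","-z"},{"+x","-x"}] : Python set equality against each
    if pySetEq open_faces ["+z", "-z"] || pySetEq open_faces ["+x", "-x"]
    then "straight" else "corner"
  else "enclosed"

-- ===== PORT B =====
def pvFaces : List String := ["+x", "-x", "+z", "-z"]

def pvClassify (mask : Nat) : String :=
  -- bin(mask).count("1") on a 4-bit mask, written as digit sum
  let n := mask % 2 + mask / 2 % 2 + mask / 4 % 2 + mask / 8 % 2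
  if n = 2 then
    if mask = 3 ∨ mask = 12 then "straight" else "corner"
  else
    -- Python's table slot for n = 2 is None but is unreachable (handled above)
    (["enclosed", "end_cap", "", "t_junction", "intersection"]).getD n ""

def pieceByPattern : List String := (List.range 16).map pvClassify

def derive_piece_type_alt (edges : List (String × String)) : String :=
  let kb := pvFaces.foldl
    (fun (kb : Nat × Nat) face =>
      ((if (PySem.Dict.mk edges).get? face == some "open" then kb.1 ||| kb.2 else kb.1),
       kb.2 <<< 1)) (0, 1)
  pieceByPattern.getD kb.1 ""

-- ===== PRECONDITION & SPEC =====
def Spec_derive_piece_type (edges : List (String × String)) (out : String) : Prop := out = derive_piece_type_alt edges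
instance (edges : List (String × String)) (out : String) : Decidable (Spec_derive_piece_type edges out) := by unfold Spec_derive_piece_type; infer_instance

-- ===== CLAIM (what is proved, stated in full; the proofs are below) =====
def Claim_equal_derive_piece_type : Prop := ∀ (edges : List (String × String)), Dom_derive_piece_type edges → Spec_derive_piece_type edges (derive_piece_type edges)

-- ===== LEMMAS AND PROOFS =====

-- ===== VERDICT (by name: the statement is the Claim_ definition above) =====
theorem derive_piece_type_spec : Claim_equal_derive_piece_type := by
  intro edges _
  unfold Spec_derive_piece_type derive_piece_type derive_piece_type_alt
  cases hpx : (PySem.Dict.mk edges).get? "+x" == some "open" <;>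
  cases hmx : (PySem.Dict.mk edges).get? "-x" == some "open" <;>
  cases hpz : (PySem.Dict.mk edges).get? "+z" == some "open" <;>
  cases hmz : (PySem.Dict.mk edges).get? "-z" == some "open" <;>
    simp [List.filter, List.foldl, hpx, hmx, hpz, hmz,
          pvFaces, pieceByPattern, pvClassify, pySetEq, List.range_succ] <;>
    simp only [beq_iff_eq, beq_eq_false_iff_ne] at hpx hmx hpz hmz <;>
    simp [hpx, hmx, hpz, hmz]
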